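-- pv_equiv track=rewrite | github.com/zozo9127/data-instructure | disjoint_q.py | disjoint_q
-- ===== SOURCE A (Python) =====
-- def disjoint_q(A , B , C):
--     for a in A:
--         for b in B:
--             if a == b:
--                 for c in C:
--                     if a == c:
--                         return False
--     return True
-- ===== SOURCE B (Python) =====
-- def disjoint_q(A, B, C):
--     return not (set(A) & set(B) & set(C))
-- ===== Notes on version B (the rewrite author's own statement) =====
-- stated objective: idiomatic
-- what changed: A's three nested ==-scans with an early return are replaced by hashing: build set(A), set(B), set(C) once and return whether their intersection is empty.
import Mathlib
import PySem

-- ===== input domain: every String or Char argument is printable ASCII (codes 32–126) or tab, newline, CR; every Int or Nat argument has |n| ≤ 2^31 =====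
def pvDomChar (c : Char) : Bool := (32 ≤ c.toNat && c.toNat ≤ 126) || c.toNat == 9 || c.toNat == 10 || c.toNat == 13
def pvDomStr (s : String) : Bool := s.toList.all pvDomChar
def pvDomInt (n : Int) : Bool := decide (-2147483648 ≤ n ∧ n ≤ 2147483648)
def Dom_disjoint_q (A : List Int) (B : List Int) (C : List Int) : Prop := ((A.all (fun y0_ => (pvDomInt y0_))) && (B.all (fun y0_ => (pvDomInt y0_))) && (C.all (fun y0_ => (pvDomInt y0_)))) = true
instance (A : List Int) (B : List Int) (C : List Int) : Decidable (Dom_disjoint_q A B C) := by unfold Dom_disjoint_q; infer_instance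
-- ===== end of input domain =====

-- B replaces A's three nested ==-scans with early return by the idiomatic set-intersection test:
-- build set(A), set(B), set(C) once and return whether their intersection is empty.

-- ===== PORT A =====
-- for c in C: if a == c: return False  (true = a match was found, i.e. Python returned False)
def dqLoopC (a : Int) : List Int → Bool
  | [] => false
  | c :: cs => if a = c then true else dqLoopC a cs

-- for b in B: if a == b: <C loop>  (true = the C loop returned False)
def dqLoopB (a : Int) (C : List Int) : List Int → Bool
  | [] => false
  | b :: bs => if a = b then (if dqLoopC a C then true else dqLoopB a C bs) else dqLoopB a C bs

-- outer loop over A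
def dqLoopA (B C : List Int) : List Int → Bool
  | [] => false
  | a :: as_ => if dqLoopB a C B then true else dqLoopA B C as_

def disjoint_q (A : List Int) (B : List Int) (C : List Int) : Bool :=
  if dqLoopA B C A then false else true

-- ===== PORT B =====
def disjoint_q_alt (A : List Int) (B : List Int) (C : List Int) : Bool :=
  (PySem.Set.inter (PySem.Set.inter (PySem.Set.ofList A) (PySem.Set.ofList B)) (PySem.Set.ofList C)).isEmpty

-- ===== PRECONDITION & SPEC =====
def Spec_disjoint_q (A : List Int) (B : List Int) (C : List Int) (out : Bool) : Prop := out = disjoint_q_alt A B C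
instance (A : List Int) (B : List Int) (C : List Int) (out : Bool) : Decidable (Spec_disjoint_q A B C out) := by unfold Spec_disjoint_q; infer_instance

-- ===== CLAIM (what is proved, stated in full; the proofs are below) =====
def Claim_equal_disjoint_q : Prop := ∀ (A : List Int) (B : List Int) (C : List Int), Dom_disjoint_q A B C → Spec_disjoint_q A B C (disjoint_q A B C)

-- ===== LEMMAS AND PROOFS =====

theorem dqLoopC_eq (a : Int) (C : List Int) : dqLoopC a C = C.any (fun c => a == c) := by
  induction C with
  | nil => rfl
  | cons c cs ih => simp [dqLoopC, ih]; by_cases h : a = c <;> simp [h]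

theorem dqLoopB_eq (a : Int) (C B : List Int) :
    dqLoopB a C B = (B.any (fun b => a == b) && dqLoopC a C) := by
  induction B with
  | nil => rfl
  | cons b bs ih =>
    simp only [dqLoopB, List.any_cons, ih]
    by_cases h : a = b <;> cases dqLoopC a C <;> simp [h]

theorem dqLoopA_eq (B C A : List Int) :
    dqLoopA B C A = A.any (fun a => B.any (fun b => a == b) && dqLoopC a C) := by
  induction A with
  | nil => rfl
  | cons a as_ ih =>
    simp only [dqLoopA, List.any_cons, ih, dqLoopB_eq]
    cases (B.any (fun b => a == b) && dqLoopC a C) <;> simp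

-- ===== VERDICT (by name: the statement is the Claim_ definition above) =====
theorem disjoint_q_spec : Claim_equal_disjoint_q := by
  intro A B C _
  unfold Spec_disjoint_q disjoint_q disjoint_q_alt
  rw [dqLoopA_eq]
  simp only [dqLoopC_eq]
  rw [Bool.eq_iff_iff]
  simp [List.isEmpty_iff, List.eq_nil_iff_forall_not_mem, PySem.Set.mem_inter, PySem.Set.mem_ofList]
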